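-- pv_equiv track=rewrite | github.com/shtewe/FinalProject | ranble4.py | countLeval
-- ===== SOURCE A (Python) =====
-- Step=2
--
-- MaxV=-32
--
-- def countLeval(Value):
--        Value+=40
--        count=0
--        if Value < MaxV:
--           Value=-1*MaxV
--        elif Value >0:
--           Value =0
--        else:
--           Value*=-1
--
--        Value=(-1*MaxV)-Value
--        while(Value>0):
--           Value-=Step
--           count+=1
--        return count
-- ===== SOURCE B (Python) =====
-- Step = 2
--
-- MaxV = -32
--
-- def countLeval(Value):
--     # closed form: the clamp collapses to min/max, the counting loop to a ceiling division
--     return (min(-MaxV, max(0, Value + 40 - MaxV)) + 1) // Step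
-- ===== Notes on version B (the rewrite author's own statement) =====
-- stated objective: simpler
-- what changed: Replaced the three-way clamp branches with a min/max expression and the counting while-loop with a closed-form ceiling division, making the whole function one arithmetic expression.
import Mathlib
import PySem

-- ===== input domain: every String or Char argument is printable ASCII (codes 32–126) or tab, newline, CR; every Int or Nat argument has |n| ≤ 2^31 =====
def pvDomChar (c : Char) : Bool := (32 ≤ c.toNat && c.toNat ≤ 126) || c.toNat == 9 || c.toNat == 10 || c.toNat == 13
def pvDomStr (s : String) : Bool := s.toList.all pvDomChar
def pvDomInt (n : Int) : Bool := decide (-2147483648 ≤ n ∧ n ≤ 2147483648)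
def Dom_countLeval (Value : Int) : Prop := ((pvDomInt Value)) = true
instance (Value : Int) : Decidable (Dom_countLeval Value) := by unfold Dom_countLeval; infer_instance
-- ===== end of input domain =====

-- ===== PORT A =====
-- B replaces A's branch clamp + counting loop by one min/max/ceiling-division expression (simpler).
def pyStep : Int := 2
def pyMaxV : Int := -32

def countLoop (v count : Int) : Int :=
  if v > 0 then countLoop (v - pyStep) (count + 1) else count
termination_by v.toNat
decreasing_by simp only [pyStep] at *; omega

def countLeval (Value : Int) : Int :=
  let v1 := Value + 40
  let v2 := if v1 < pyMaxV then -1 * pyMaxV else if v1 > 0 then 0 else v1 * (-1)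
  let v3 := (-1 * pyMaxV) - v2
  countLoop v3 0

-- ===== PORT B =====
def countLeval_alt (Value : Int) : Int :=
  PySem.Int.floordiv (min (-pyMaxV) (max 0 (Value + 40 - pyMaxV)) + 1) pyStep

-- ===== PRECONDITION & SPEC =====
def Spec_countLeval (Value : Int) (out : Int) : Prop := out = countLeval_alt Value
instance (Value : Int) (out : Int) : Decidable (Spec_countLeval Value out) := by unfold Spec_countLeval; infer_instance

-- ===== CLAIM (what is proved, stated in full; the proofs are below) =====
def Claim_equal_countLeval : Prop := ∀ (Value : Int), Dom_countLeval Value → Spec_countLeval Value (countLeval Value)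

-- ===== LEMMAS AND PROOFS =====
-- the counting loop computes max 0 (ceil (v/2)) added to its accumulator
lemma countLoop_eq (n : Nat) : ∀ v c : Int, v.toNat ≤ n → countLoop v c = c + max 0 ((v + 1) / 2) := by
  induction n with
  | zero =>
      intro v c h
      rw [countLoop]
      have hv : v ≤ 0 := by omega
      simp only [if_neg (by omega : ¬ v > 0)]
      omega
  | succ n ih =>
      intro v c h
      rw [countLoop]
      by_cases hv : v > 0
      · simp only [if_pos hv, pyStep]
        rw [ih (v - 2) (c + 1) (by omega)]
        omega
      · simp only [if_neg hv]
        omega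

theorem countLeval_spec : Claim_equal_countLeval := by
  intro Value _
  unfold Spec_countLeval countLeval countLeval_alt pyMaxV pyStep
  rw [PySem.Int.floordiv_eq_ediv_of_pos (by omega)]
  simp only []
  rw [countLoop_eq (-1 * -32 - (if Value + 40 < -32 then -1 * -32 else if Value + 40 > 0 then 0 else (Value + 40) * (-1))).toNat _ _ (le_refl _)]
  split_ifs <;> omega
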